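-- pv_equiv track=rewrite | github.com/radomskih/rotation_art_gallery | rotation/rotation.py | remove_guards_greedy
-- ===== SOURCE A (Python) =====
-- def is_complete(regions, configuration): #checks if visibility over time is complete for all regions
--     config_mask = 0
--     for i, b in enumerate(configuration):
--         if b == 1:
--             config_mask |= (1 << i)
--
--     for (_, VT) in regions:
--         if (VT & config_mask) == 0:
--             return False
--     return True
--
-- def guard_redundancy_score(matrix, configuration, guard_index):
--     n = len(configuration)
--     score = 0
--     is_covered = True
--
--     for r in range(len(matrix)):
--         for t in range(n):
--             if matrix[r][guard_index][t] == 1: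
--                 temp = score #note the redundancy score before checking other guards
--                 # Check if other guards are covering this (r, t)
--                 for g in range(n):
--                     if g != guard_index and configuration[g] == 1 and matrix[r][g][t] == 1:
--                         score+=1
--                 if temp == score: #if the score is unchanged, no other guards see this region at this time, so no redundancy
--                     is_covered = False
--                     score = -1
--                     return score
--     return score
--
-- def most_redundant_guard(matrix, configuration): #find the guard with the most overlapping visibility
--     max_score = -1
--     most_redundant = -1
--     for g in range(len(configuration)):
--         if configuration[g] == 1:
--             score = guard_redundancy_score(matrix, configuration, g)
--             if score > max_score:
--                 max_score = score
--                 most_redundant = g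
--     return most_redundant, max_score
--
-- def remove_guards_greedy(matrix, regions, configuration):
--     while True:
--         g, score = most_redundant_guard(matrix, configuration) #find most redundant guard
--         if g == -1:
--             break
--         #temporarily remove it
--         configuration[g] = 0
--         if not is_complete(regions, configuration):
--             configuration[g] = 1  #restore if coverage is broken
--             break
--     return configuration
-- ===== SOURCE B (Python) =====
-- # Greedy removal restructured: scan only the active guards, and score each guard
-- # from a per-round table of per-(region,time) coverage counts instead of an inner
-- # scan over all other guards for every covered cell.
-- # Mutates `configuration` in place like the original; return value is the same list.
-- def remove_guards_greedy(matrix, regions, configuration):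
--     n = len(configuration)
--     while True:
--         active = [g for g in range(n) if configuration[g] == 1]
--         if not active:
--             return configuration  # no guard left to remove
--         # coverage count of each (r, t) cell by the currently active guards
--         cover = [[sum(1 for g in active if row[g][t] == 1) for t in range(n)]
--                  for row in matrix]
--         best_g, best_score = -1, -1
--         for g in active:
--             covered = [(r, t) for r in range(len(matrix)) for t in range(n)
--                        if matrix[r][g][t] == 1]
--             if any(cover[r][t] == 1 for (r, t) in covered):
--                 s = -1  # some cell is seen by g alone: g is essential
--             else:
--                 s = sum(cover[r][t] - 1 for (r, t) in covered)
--             if s > best_score: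
--                 best_g, best_score = g, s
--         if best_g == -1:
--             return configuration
--         configuration[best_g] = 0
--         mask = 0
--         for i, b in enumerate(configuration):
--             if b == 1:
--                 mask |= 1 << i
--         if any((vt & mask) == 0 for (_, vt) in regions):
--             configuration[best_g] = 1  # removal breaks coverage: undo and stop
--             return configuration
-- ===== Notes on version B (the rewrite author's own statement) =====
-- stated objective: alternative
-- what changed: B lists the active guards once per round and scores each guard from a precomputed per-(region,time) table of active-guard coverage counts (score = sum of cover-1 over its cells, essential iff some covered cell has cover 1), instead of A's inner early-exiting scan over all other guards for every covered cell.
-- outside the precondition, e.g. on remove_guards_greedy([[[1]], [[]]], [], [1]): A returns [1], B raises IndexError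
import Mathlib
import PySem

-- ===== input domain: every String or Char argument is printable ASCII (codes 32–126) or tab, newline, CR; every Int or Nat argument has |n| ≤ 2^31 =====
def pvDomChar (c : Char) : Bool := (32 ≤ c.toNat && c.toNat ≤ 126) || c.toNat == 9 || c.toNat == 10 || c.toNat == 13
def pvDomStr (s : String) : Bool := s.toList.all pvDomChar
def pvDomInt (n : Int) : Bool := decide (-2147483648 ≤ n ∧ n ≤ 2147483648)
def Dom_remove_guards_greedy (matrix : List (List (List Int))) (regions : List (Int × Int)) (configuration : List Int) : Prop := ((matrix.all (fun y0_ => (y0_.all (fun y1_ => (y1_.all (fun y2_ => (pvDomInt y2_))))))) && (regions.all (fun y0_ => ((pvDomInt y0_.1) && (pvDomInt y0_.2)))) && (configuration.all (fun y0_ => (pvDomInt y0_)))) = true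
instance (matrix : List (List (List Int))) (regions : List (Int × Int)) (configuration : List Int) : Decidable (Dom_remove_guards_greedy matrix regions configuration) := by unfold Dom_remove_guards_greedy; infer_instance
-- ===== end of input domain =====

-- B replaces A's per-guard inner scan over the other guards by a per-round table of
-- per-(region,time) coverage counts over the active guards (objective: alternative).
-- Both A and B mutate `configuration` in place the same way; the theorems are about
-- the return value.

-- ===== PORT A =====
-- matrix[r][g][t]; exact under Pre_ (all accessed indices are in range there)
def pvCellA (matrix : List (List (List Int))) (r g t : Nat) : Int :=
  ((matrix.getD r []).getD g []).getD t 0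

-- inner 'for g in range(n)' loop of guard_redundancy_score (number of OTHER active guards seeing (r,t))
def pvOtherGuards (matrix : List (List (List Int))) (config : List Int) (gi r t : Nat) : Int :=
  (List.range config.length).foldl
    (fun score g =>
      if (g ≠ gi ∧ config.getD g 0 = 1 ∧ pvCellA matrix r g t = 1) then score + 1 else score) 0

-- the two nested loops 'for r in range(len(matrix)): for t in range(n)' with the early 'return -1'
def pvGrsGo (matrix : List (List (List Int))) (config : List Int) (gi : Nat) :
    List (Nat × Nat) → Int → Int
  | [], score => score
  | (r, t) :: rest, score =>
    if pvCellA matrix r gi t = 1 then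
      let c := pvOtherGuards matrix config gi r t
      if c = 0 then -1 else pvGrsGo matrix config gi rest (score + c)
    else pvGrsGo matrix config gi rest score

def pvGuardRedundancyScore (matrix : List (List (List Int))) (config : List Int) (gi : Nat) : Int :=
  pvGrsGo matrix config gi
    ((List.range matrix.length).flatMap (fun r => (List.range config.length).map (fun t => (r, t)))) 0

-- most_redundant_guard: returns (most_redundant, max_score)
def pvMostRedundant (matrix : List (List (List Int))) (config : List Int) : Int × Int :=
  (List.range config.length).foldl
    (fun st g =>
      if config.getD g 0 = 1 then
        let score := pvGuardRedundancyScore matrix config g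
        if score > st.2 then ((g : Int), score) else st
      else st)
    (-1, -1)

-- config_mask of is_complete
def pvConfigMask (config : List Int) : Int :=
  config.zipIdx.foldl (fun m p => if p.1 = 1 then PySem.Int.bor m ((1 : Int) <<< (p.2 : Int)) else m) 0

def pvIsComplete (regions : List (Int × Int)) (config : List Int) : Bool :=
  let mask := pvConfigMask config
  regions.all (fun rv => !(PySem.Int.band rv.2 mask == 0))

-- the 'while True' loop; each pass through the recursion clears one active guard, so
-- configuration.length + 1 units of fuel are never exhausted before Python's loop breaks
def pvLoopA (matrix : List (List (List Int))) (regions : List (Int × Int)) :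
    Nat → List Int → List Int
  | 0, config => config
  | fuel+1, config =>
    let gs := pvMostRedundant matrix config
    if gs.1 = -1 then config
    else
      let config' := config.set gs.1.toNat 0   -- gs.1 ≥ 0 here, so .toNat is exact
      if pvIsComplete regions config' then pvLoopA matrix regions fuel config'
      else config'.set gs.1.toNat 1

def remove_guards_greedy (matrix : List (List (List Int))) (regions : List (Int × Int)) (configuration : List Int) : List Int :=
  pvLoopA matrix regions (configuration.length + 1) configuration

-- ===== PORT B =====
def pvAltCell (matrix : List (List (List Int))) (r g t : Nat) : Int :=
  ((matrix.getD r []).getD g []).getD t 0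

-- the list of currently active guards
def pvAltActive (config : List Int) : List Nat :=
  (List.range config.length).filter (fun g => config.getD g 0 == 1)

-- cover[r][t] = number of active guards seeing cell (r,t)
def pvAltCover (matrix : List (List (List Int))) (config : List Int) : List (List Int) :=
  matrix.map (fun row => (List.range config.length).map (fun t =>
    (((pvAltActive config).filter
        (fun g => (row.getD g []).getD t 0 == 1)).length : Int)))

def pvAltCoverAt (cover : List (List Int)) (r t : Nat) : Int := (cover.getD r []).getD t 0

-- the cells guard g covers
def pvAltCovered (matrix : List (List (List Int))) (n g : Nat) : List (Nat × Nat) :=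
  (List.range matrix.length).flatMap (fun r =>
    ((List.range n).filter (fun t => pvAltCell matrix r g t == 1)).map (fun t => (r, t)))

-- -1 if some covered cell is seen by g alone, else the sum of (cover-1) over g's cells
def pvAltScore (matrix : List (List (List Int))) (cover : List (List Int)) (n g : Nat) : Int :=
  let covered := pvAltCovered matrix n g
  if covered.any (fun p => pvAltCoverAt cover p.1 p.2 == 1) then -1
  else covered.foldl (fun s p => s + (pvAltCoverAt cover p.1 p.2 - 1)) 0

def pvAltSelect (matrix : List (List (List Int))) (cover : List (List Int)) (config : List Int) : Int × Int :=
  (pvAltActive config).foldl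
    (fun st g =>
      let s := pvAltScore matrix cover config.length g
      if s > st.2 then ((g : Int), s) else st)
    (-1, -1)

def pvAltMask (config : List Int) : Int :=
  config.zipIdx.foldl (fun m p => if p.1 = 1 then PySem.Int.bor m ((1 : Int) <<< (p.2 : Int)) else m) 0

def pvAltBroken (regions : List (Int × Int)) (mask : Int) : Bool :=
  regions.any (fun rv => PySem.Int.band rv.2 mask == 0)

def pvLoopB (matrix : List (List (List Int))) (regions : List (Int × Int)) :
    Nat → List Int → List Int
  | 0, config => config
  | fuel+1, config =>
    let active := pvAltActive config
    if active.isEmpty then config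
    else
      let cover := pvAltCover matrix config
      let gs := pvAltSelect matrix cover config
      if gs.1 = -1 then config
      else
        let config' := config.set gs.1.toNat 0
        if pvAltBroken regions (pvAltMask config') then config'.set gs.1.toNat 1
        else pvLoopB matrix regions fuel config'

def remove_guards_greedy_alt (matrix : List (List (List Int))) (regions : List (Int × Int)) (configuration : List Int) : List Int :=
  pvLoopB matrix regions (configuration.length + 1) configuration

-- ===== PRECONDITION & SPEC =====
-- Pre_ excludes the inputs on which Python A raises IndexError (a matrix too short at a cell an
-- active guard scans), and with them the ragged matrices whose out-of-shape cells A happens never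
-- to reach only because its scoring loop exits early on an essential guard (B scans all cells).
def Pre_remove_guards_greedy (matrix : List (List (List Int))) (regions : List (Int × Int)) (configuration : List Int) : Prop :=
  (∃ g ∈ List.range configuration.length, configuration.getD g 0 = 1) →
  ∀ row ∈ matrix, ∀ g ∈ List.range configuration.length, configuration.getD g 0 = 1 →
    g < row.length ∧ configuration.length ≤ (row.getD g []).length
instance (matrix : List (List (List Int))) (regions : List (Int × Int)) (configuration : List Int) : Decidable (Pre_remove_guards_greedy matrix regions configuration) := by unfold Pre_remove_guards_greedy; infer_instance

def pvWitness_remove_guards_greedy : List (List (List Int)) × (List (Int × Int)) × List Int :=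
  ([[[1, 1], [1, 1]]], ([(0, 3)], [1, 1]))

def Spec_remove_guards_greedy (matrix : List (List (List Int))) (regions : List (Int × Int)) (configuration : List Int) (out : List Int) : Prop := out = remove_guards_greedy_alt matrix regions configuration
instance (matrix : List (List (List Int))) (regions : List (Int × Int)) (configuration : List Int) (out : List Int) : Decidable (Spec_remove_guards_greedy matrix regions configuration out) := by unfold Spec_remove_guards_greedy; infer_instance

-- ===== CLAIM (what is proved, stated in full; the proofs are below) =====
def Claim_equal_remove_guards_greedy : Prop := ∀ (matrix : List (List (List Int))) (regions : List (Int × Int)) (configuration : List Int), Dom_remove_guards_greedy matrix regions configuration → Pre_remove_guards_greedy matrix regions configuration → Spec_remove_guards_greedy matrix regions configuration (remove_guards_greedy matrix regions configuration)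

-- ===== LEMMAS AND PROOFS =====

theorem pv_witness_ok :
    Dom_remove_guards_greedy pvWitness_remove_guards_greedy.1 pvWitness_remove_guards_greedy.2.1 pvWitness_remove_guards_greedy.2.2 ∧
    Pre_remove_guards_greedy pvWitness_remove_guards_greedy.1 pvWitness_remove_guards_greedy.2.1 pvWitness_remove_guards_greedy.2.2 := by
  decide

-- B's cover-table entry at an in-range cell is the count of active guards seeing it
theorem pv_cover_at (matrix : List (List (List Int))) (config : List Int) (r t : Nat)
    (hr : r < matrix.length) (ht : t < config.length) :
    pvAltCoverAt (pvAltCover matrix config) r t =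
      (((List.range config.length).filter
          (fun g => (config.getD g 0 == 1) && (pvCellA matrix r g t == 1))).length : Int) := by
  unfold pvAltCoverAt pvAltCover pvCellA
  have h1 : ∀ (F : List (List Int) → List Int), (matrix.map F).getD r [] = F matrix[r] := by
    intro F
    rw [List.getD_eq_getElem?_getD, List.getElem?_map, List.getElem?_eq_getElem hr]
    rfl
  rw [h1, PySem.List.getD_map_range _ _ _ _ ht]
  have h2 : matrix.getD r [] = matrix[r] := by
    rw [List.getD_eq_getElem?_getD, List.getElem?_eq_getElem hr]
    rfl
  rw [h2]
  unfold pvAltActive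
  rw [List.filter_filter]
  have h3 : (List.range config.length).filter
        (fun g => ((matrix[r].getD g []).getD t 0 == 1) && (config.getD g 0 == 1))
      = (List.range config.length).filter
        (fun g => (config.getD g 0 == 1) && ((matrix[r].getD g []).getD t 0 == 1)) :=
    List.filter_congr (fun g _ => Bool.and_comm _ _)
  rw [h3]

-- A's inner guard loop is a countP
theorem pv_other_count (matrix : List (List (List Int))) (config : List Int) (gi r t : Nat) :
    pvOtherGuards matrix config gi r t =
      (((List.range config.length).filter
        (fun g => (!(g == gi)) && (config.getD g 0 == 1) && (pvCellA matrix r g t == 1))).length : Int) := by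
  unfold pvOtherGuards
  have hfun : (fun (score : Int) (g : Nat) =>
      if (g ≠ gi ∧ config.getD g 0 = 1 ∧ pvCellA matrix r g t = 1) then score + 1 else score)
      = (fun (score : Int) (g : Nat) =>
      if ((!(g == gi)) && (config.getD g 0 == 1) && (pvCellA matrix r g t == 1)) = true
      then score + 1 else score) := by
    funext score g
    by_cases h1 : g = gi <;> by_cases h2 : config.getD g 0 = 1 <;>
      by_cases h3 : pvCellA matrix r g t = 1 <;> simp [h1, h3]
  rw [hfun, PySem.List.foldl_count_if, List.countP_eq_length_filter]
  ring

-- dropping one element that satisfies the predicate from the count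
theorem pv_countP_split (l : List Nat) (gi : Nat) (P : Nat → Bool) (h : P gi = true) :
    l.countP P = l.countP (fun g => (!(g == gi)) && P g) + l.count gi := by
  induction l with
  | nil => simp
  | cons x xs ih =>
    by_cases hx : x = gi
    · subst hx
      simp [h, ih]
      omega
    · simp [List.countP_cons, hx, ih]
      by_cases hp : P x = true <;> simp [hp] <;> omega

-- on an in-range covered cell of an active guard, A's inner count is cover − 1
theorem pv_other_eq_cover_sub_one (matrix : List (List (List Int))) (config : List Int)
    (gi r t : Nat) (hr : r < matrix.length) (ht : t < config.length) (hg : gi < config.length)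
    (hact : config.getD gi 0 = 1) (hcell : pvCellA matrix r gi t = 1) :
    pvOtherGuards matrix config gi r t = pvAltCoverAt (pvAltCover matrix config) r t - 1 := by
  rw [pv_other_count, pv_cover_at matrix config r t hr ht]
  have hsplit := pv_countP_split (List.range config.length) gi
      (fun g => (config.getD g 0 == 1) && (pvCellA matrix r g t == 1))
      (by show ((config.getD gi 0 == 1) && (pvCellA matrix r gi t == 1)) = true
          rw [hact, hcell]; rfl)
  rw [List.count_eq_one_of_mem List.nodup_range (List.mem_range.mpr hg)] at hsplit
  rw [List.countP_eq_length_filter, List.countP_eq_length_filter] at hsplit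
  have : ((List.range config.length).filter
        (fun g => (!(g == gi)) && ((config.getD g 0 == 1) && (pvCellA matrix r g t == 1))))
      = ((List.range config.length).filter
        (fun g => (!(g == gi)) && (config.getD g 0 == 1) && (pvCellA matrix r g t == 1))) := by
    simp [Bool.and_assoc]
  rw [this] at hsplit
  omega

-- A's early-exit scan over a pair list = B's any/sum formulation
theorem pv_grs_shape (matrix : List (List (List Int))) (config : List Int) (gi : Nat)
    (hg : gi < config.length) (hact : config.getD gi 0 = 1)
    (pairs : List (Nat × Nat)) (score : Int)
    (hb : ∀ p ∈ pairs, p.1 < matrix.length ∧ p.2 < config.length) :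
    pvGrsGo matrix config gi pairs score =
      (if (pairs.filter (fun p => pvCellA matrix p.1 gi p.2 == 1)).any
            (fun p => pvAltCoverAt (pvAltCover matrix config) p.1 p.2 == 1) then -1
       else score + (pairs.filter (fun p => pvCellA matrix p.1 gi p.2 == 1)).foldl
              (fun s p => s + (pvAltCoverAt (pvAltCover matrix config) p.1 p.2 - 1)) 0) := by
  induction pairs generalizing score with
  | nil => simp [pvGrsGo]
  | cons p rest ih =>
    obtain ⟨r, t⟩ := p
    have hr : r < matrix.length := (hb (r, t) (List.mem_cons_self)).1
    have ht : t < config.length := (hb (r, t) (List.mem_cons_self)).2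
    have hbrest : ∀ q ∈ rest, q.1 < matrix.length ∧ q.2 < config.length :=
      fun q hq => hb q (List.mem_cons_of_mem _ hq)
    by_cases hc : pvCellA matrix r gi t = 1
    · have hmem : gi ∈ (List.range config.length).filter
          (fun g => (config.getD g 0 == 1) && (pvCellA matrix r g t == 1)) :=
        List.mem_filter.mpr ⟨List.mem_range.mpr hg, by rw [hact, hc]; rfl⟩
      have hcov1 : 1 ≤ pvAltCoverAt (pvAltCover matrix config) r t := by
        rw [pv_cover_at matrix config r t hr ht]
        have := List.length_pos_of_mem hmem
        omega
      have hceq : pvOtherGuards matrix config gi r t =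
          pvAltCoverAt (pvAltCover matrix config) r t - 1 :=
        pv_other_eq_cover_sub_one matrix config gi r t hr ht hg hact hc
      have hfc : List.filter (fun p => pvCellA matrix p.1 gi p.2 == 1) ((r, t) :: rest)
          = (r, t) :: List.filter (fun p => pvCellA matrix p.1 gi p.2 == 1) rest := by
        simp [hc]
      simp only [pvGrsGo, if_pos hc, hceq, hfc]
      by_cases h1 : pvAltCoverAt (pvAltCover matrix config) r t = 1
      · simp [h1]
      · have h1b : (pvAltCoverAt (pvAltCover matrix config) r t == 1) = false := by
          simpa using h1
        have hc0 : ¬ (pvAltCoverAt (pvAltCover matrix config) r t - 1 = 0) := by omega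
        rw [if_neg hc0, ih _ hbrest, List.any_cons, h1b, Bool.false_or]
        by_cases h2 : (rest.filter (fun p => pvCellA matrix p.1 gi p.2 == 1)).any
            (fun p => pvAltCoverAt (pvAltCover matrix config) p.1 p.2 == 1)
        · rw [if_pos h2, if_pos h2]
        · rw [if_neg (by simpa using h2), if_neg (by simpa using h2), List.foldl_cons,
            PySem.List.foldl_add, PySem.List.foldl_add]
          ring
    · have hcb : (pvCellA matrix r gi t == 1) = false := by simpa using hc
      have hfc2 : List.filter (fun p => pvCellA matrix p.1 gi p.2 == 1) ((r, t) :: rest)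
          = List.filter (fun p => pvCellA matrix p.1 gi p.2 == 1) rest := by
        simp [hcb]
      simp only [pvGrsGo, if_neg hc, hfc2]
      exact ih _ hbrest

-- A's score of an active guard equals B's cover-based score
theorem pv_score_eq (matrix : List (List (List Int))) (config : List Int) (g : Nat)
    (hg : g < config.length) (hact : config.getD g 0 = 1) :
    pvGuardRedundancyScore matrix config g =
      pvAltScore matrix (pvAltCover matrix config) config.length g := by
  have hbounds : ∀ p ∈ (List.range matrix.length).flatMap
      (fun r => (List.range config.length).map (fun t => (r, t))),
      p.1 < matrix.length ∧ p.2 < config.length := by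
    intro p hp
    simp only [List.mem_flatMap, List.mem_map, List.mem_range] at hp
    obtain ⟨r, hrlt, t, htlt, rfl⟩ := hp
    exact ⟨hrlt, htlt⟩
  have hcov : pvAltCovered matrix config.length g =
      ((List.range matrix.length).flatMap
        (fun r => (List.range config.length).map (fun t => (r, t)))).filter
        (fun p => pvCellA matrix p.1 g p.2 == 1) := by
    unfold pvAltCovered
    rw [List.filter_flatMap]
    have hper : ∀ r : Nat,
        ((List.range config.length).filter (fun t => pvAltCell matrix r g t == 1)).map
            (fun t => (r, t))
        = ((List.range config.length).map (fun t => (r, t))).filter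
            (fun p => pvCellA matrix p.1 g p.2 == 1) := by
      intro r
      rw [List.filter_map]
      rfl
    simp only [hper]
  unfold pvGuardRedundancyScore pvAltScore
  rw [pv_grs_shape matrix config g hg hact _ 0 hbounds, hcov, zero_add]

theorem pv_select_eq (matrix : List (List (List Int))) (config : List Int) :
    pvMostRedundant matrix config = pvAltSelect matrix (pvAltCover matrix config) config := by
  unfold pvMostRedundant pvAltSelect pvAltActive
  rw [List.foldl_filter]
  apply PySem.List.foldl_congr_mem
  intro acc g hgmem
  by_cases ha : config.getD g 0 = 1
  · have hab : (config.getD g 0 == 1) = true := by rw [ha]; rfl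
    rw [if_pos ha, if_pos hab, pv_score_eq matrix config g (List.mem_range.mp hgmem) ha]
  · have hab : ¬ ((config.getD g 0 == 1) = true) := by simpa using ha
    rw [if_neg ha, if_neg hab]

theorem pv_complete_eq (regions : List (Int × Int)) (config : List Int) :
    pvIsComplete regions config = !(pvAltBroken regions (pvAltMask config)) := by
  show (regions.all fun rv => !(PySem.Int.band rv.2 (pvConfigMask config) == 0))
      = !(regions.any fun rv => PySem.Int.band rv.2 (pvAltMask config) == 0)
  have hmask : pvAltMask config = pvConfigMask config := rfl
  rw [hmask]
  exact List.not_any_eq_all_not.symm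

-- with no active guard, A's selection fold never moves off its initial (-1, -1)
theorem pv_mrg_empty (matrix : List (List (List Int))) (config : List Int)
    (h : pvAltActive config = []) :
    pvMostRedundant matrix config = (-1, -1) := by
  unfold pvMostRedundant
  have hall : ∀ g ∈ List.range config.length, ¬ (config.getD g 0 = 1) := by
    intro g hgmem hg1
    have : g ∈ pvAltActive config :=
      List.mem_filter.mpr ⟨hgmem, by rw [hg1]; rfl⟩
    simp [h] at this
  rw [PySem.List.foldl_congr_mem _ _ (fun st _ => st) _
    (by intro acc g hgmem; rw [if_neg (hall g hgmem)])]
  exact List.foldl_fixed _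

theorem pv_loop_eq (matrix : List (List (List Int))) (regions : List (Int × Int))
    (fuel : Nat) (config : List Int) :
    pvLoopA matrix regions fuel config = pvLoopB matrix regions fuel config := by
  induction fuel generalizing config with
  | zero => rfl
  | succ n ih =>
    simp only [pvLoopA, pvLoopB]
    by_cases hae : (pvAltActive config).isEmpty
    · rw [if_pos hae, pv_mrg_empty matrix config (List.isEmpty_iff.mp hae)]
      simp
    rw [if_neg hae, ← pv_select_eq matrix config]
    by_cases hg : (pvMostRedundant matrix config).1 = -1
    · rw [if_pos hg, if_pos hg]
    · rw [if_neg hg, if_neg hg, pv_complete_eq regions]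
      cases hbk : pvAltBroken regions
          (pvAltMask (config.set (pvMostRedundant matrix config).1.toNat 0)) <;>
        simp [ih]

-- ===== VERDICT (by name: the statement is the Claim_ definition above) =====
theorem remove_guards_greedy_spec : Claim_equal_remove_guards_greedy := by
  intro matrix regions configuration _ _
  unfold Spec_remove_guards_greedy remove_guards_greedy remove_guards_greedy_alt
  exact pv_loop_eq matrix regions (configuration.length + 1) configuration
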